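-- pv_equiv track=rewrite | github.com/dmitry957/codewars-training | kata/7-kyu/four-piles-of-apples/solution.py | four_piles
-- ===== SOURCE A (Python) =====
-- def four_piles(n,y):
--     for x in range(1, n + 1):
--         if x % y != 0:
--             continue
--         a = x + y
--         b = x - y
--         c = x * y
--         d = x // y
--         total = a + b + c + d
--         if total == n and all(p > 0 for p in [a, b, c, d]):
--             return [a, b, c, d]
--     return []
-- ===== SOURCE B (Python) =====
-- def four_piles(n, y):
--     # Closed form: total = x + y + x - y + x*y + x//y = x*(y+1)**2 / y when y | x, y > 0,
--     # so the unique candidate is x = n*y // (y+1)**2; verify it exactly.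
--     if y <= 0 or n <= 0:
--         return []
--     s = (y + 1) ** 2
--     if (n * y) % s != 0:
--         return []
--     x = (n * y) // s
--     if 1 <= x <= n and x % y == 0 and x > y:
--         return [x + y, x - y, x * y, x // y]
--     return []
-- ===== Notes on version B (the rewrite author's own statement) =====
-- stated objective: faster
-- what changed: B replaces A's linear scan over x in 1..n by the O(1) closed form x = n*y // (y+1)**2 (since total = x*(y+1)^2/y), verified exactly for divisibility, range and positivity.
import Mathlib
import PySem

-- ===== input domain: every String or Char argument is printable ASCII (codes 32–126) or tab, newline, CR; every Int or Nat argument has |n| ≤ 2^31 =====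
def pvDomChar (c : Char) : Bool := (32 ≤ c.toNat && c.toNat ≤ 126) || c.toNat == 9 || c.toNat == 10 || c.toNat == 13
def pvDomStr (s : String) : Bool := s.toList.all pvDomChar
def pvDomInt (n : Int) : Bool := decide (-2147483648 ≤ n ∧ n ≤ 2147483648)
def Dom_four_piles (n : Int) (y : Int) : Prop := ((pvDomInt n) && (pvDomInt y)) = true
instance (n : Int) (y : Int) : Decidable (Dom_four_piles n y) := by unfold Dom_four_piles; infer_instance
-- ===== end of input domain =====

-- B replaces A's linear scan for x by the O(1) closed form x = n*y // (y+1)^2 (total = x*(y+1)^2/y), verified exactly.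

-- ===== PORT A =====
-- the 'for x in range(1, n+1)' loop: first x that passes both tests wins
def fourA_go (n : Int) (y : Int) : List Int → List Int
  | [] => []
  | x :: rest =>
    if PySem.Int.mod x y ≠ 0 then fourA_go n y rest
    else
      let a := x + y
      let b := x - y
      let c := x * y
      let d := PySem.Int.floordiv x y
      let total := a + b + c + d
      if total = n ∧ (0 < a ∧ 0 < b ∧ 0 < c ∧ 0 < d) then [a, b, c, d]
      else fourA_go n y rest

def four_piles (n : Int) (y : Int) : List Int :=
  fourA_go n y (PySem.List.pyRange 1 (n + 1))

-- ===== PORT B =====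
def four_piles_alt (n : Int) (y : Int) : List Int :=
  if y ≤ 0 ∨ n ≤ 0 then []
  else
    let s := (y + 1) ^ 2
    if PySem.Int.mod (n * y) s ≠ 0 then []
    else
      let x := PySem.Int.floordiv (n * y) s
      if 1 ≤ x ∧ x ≤ n ∧ PySem.Int.mod x y = 0 ∧ y < x then
        [x + y, x - y, x * y, PySem.Int.floordiv x y]
      else []

-- ===== PRECONDITION & SPEC =====
-- Pre_ excludes y = 0 with n ≥ 1, where A raises ZeroDivisionError on 'x % y'.
def Pre_four_piles (n : Int) (y : Int) : Prop := y ≠ 0 ∨ n < 1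
instance (n : Int) (y : Int) : Decidable (Pre_four_piles n y) := by unfold Pre_four_piles; infer_instance
def pvWitness_four_piles : Int × Int := (12, 1)

def Spec_four_piles (n : Int) (y : Int) (out : List Int) : Prop := out = four_piles_alt n y
instance (n : Int) (y : Int) (out : List Int) : Decidable (Spec_four_piles n y out) := by unfold Spec_four_piles; infer_instance

-- ===== CLAIM (what is proved, stated in full; the proofs are below) =====
def Claim_equal_four_piles : Prop := ∀ (n : Int) (y : Int), Dom_four_piles n y → Pre_four_piles n y → Spec_four_piles n y (four_piles n y)

-- ===== LEMMAS AND PROOFS =====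

-- the loop-body test, as a proposition on x
def fourA_P (n : Int) (y : Int) (x : Int) : Prop :=
  PySem.Int.mod x y = 0 ∧
    ((x + y) + (x - y) + x * y + PySem.Int.floordiv x y = n ∧
      (0 < x + y ∧ 0 < x - y ∧ 0 < x * y ∧ 0 < PySem.Int.floordiv x y))

lemma fourA_go_none (n y : Int) (L : List Int) (h : ∀ x ∈ L, ¬ fourA_P n y x) :
    fourA_go n y L = [] := by
  induction L with
  | nil => rfl
  | cons x rest ih =>
    have hx := h x (List.mem_cons_self ..)
    have hrest : ∀ z ∈ rest, ¬ fourA_P n y z := fun z hz => h z (List.mem_cons_of_mem _ hz)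
    simp only [fourA_go]
    by_cases h1 : PySem.Int.mod x y = 0
    · simp only [h1, ne_eq, not_true_eq_false, if_false]
      rw [if_neg (fun hc => hx ⟨h1, hc⟩)]
      exact ih hrest
    · rw [if_pos h1]
      exact ih hrest

lemma fourA_go_found (n y x0 : Int) (L : List Int) (hmem : x0 ∈ L) (hP : fourA_P n y x0)
    (huniq : ∀ x ∈ L, fourA_P n y x → x = x0) :
    fourA_go n y L = [x0 + y, x0 - y, x0 * y, PySem.Int.floordiv x0 y] := by
  induction L with
  | nil => cases hmem
  | cons x rest ih =>
    simp only [fourA_go]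
    by_cases hpx : fourA_P n y x
    · have hx : x = x0 := huniq x (List.mem_cons_self ..) hpx
      subst hx
      simp only [hpx.1, ne_eq, not_true_eq_false, if_false]
      rw [if_pos hpx.2]
    · have hx : x ≠ x0 := fun he => hpx (he ▸ hP)
      have hmem' : x0 ∈ rest := by
        rcases List.mem_cons.mp hmem with h | h
        · exact absurd h.symm hx
        · exact h
      have huniq' : ∀ z ∈ rest, fourA_P n y z → z = x0 :=
        fun z hz => huniq z (List.mem_cons_of_mem _ hz)
      by_cases h1 : PySem.Int.mod x y = 0
      · simp only [h1, ne_eq, not_true_eq_false, if_false]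
        rw [if_neg (fun hc => hpx ⟨h1, hc⟩)]
        exact ih hmem' huniq'
      · rw [if_pos h1]
        exact ih hmem' huniq'

-- characterisation of the loop test for y ≥ 1 and x in the scanned range
lemma fourA_P_char (n y x : Int) (hy : 1 ≤ y) (hx1 : 1 ≤ x) :
    fourA_P n y x ↔ (x * (y + 1) ^ 2 = n * y ∧ y ∣ x ∧ y < x) := by
  have hy0 : (0 : Int) < y := hy
  have hyne : y ≠ 0 := ne_of_gt hy0
  constructor
  · rintro ⟨hmod, htot, _, hb, _, _⟩
    have hdvd : y ∣ x := (PySem.Int.mod_eq_zero_iff_dvd x y).mp hmod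
    refine ⟨?_, hdvd, by omega⟩
    obtain ⟨k, hk⟩ := hdvd
    have hfd : PySem.Int.floordiv x y = k := by
      rw [PySem.Int.floordiv_eq_ediv_of_pos hy0, hk, Int.mul_ediv_cancel_left k hyne]
    rw [hfd, hk] at htot
    rw [hk]; nlinarith [htot]
  · rintro ⟨heq, hdvd, hlt⟩
    obtain ⟨k, hk⟩ := hdvd
    have hk1 : 1 ≤ k := by nlinarith [hk]
    have hfd : PySem.Int.floordiv x y = k := by
      rw [PySem.Int.floordiv_eq_ediv_of_pos hy0, hk, Int.mul_ediv_cancel_left k hyne]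
    refine ⟨(PySem.Int.mod_eq_zero_iff_dvd x y).mpr ⟨k, hk⟩, ?_, by omega, by omega,
      mul_pos (by omega) hy0, by omega⟩
    have : x * (y + 1) ^ 2 = ((x + y) + (x - y) + x * y + k) * y := by rw [hk]; ring
    rw [hfd]
    have := heq ▸ this
    exact mul_right_cancel₀ hyne (by linarith [this])

theorem four_piles_spec : Claim_equal_four_piles := by
  intro n y _ hpre
  unfold Spec_four_piles four_piles four_piles_alt
  by_cases htriv : y ≤ 0 ∨ n ≤ 0
  · rw [if_pos htriv]
    apply fourA_go_none
    intro x hx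
    have hxr := PySem.List.mem_pyRange_one.mp hx
    rcases htriv with hy | hn
    · -- y < 0 (y = 0 excluded by Pre_ since 1 ≤ x ≤ n); c = x*y < 0
      have hyne : y < 0 := by
        rcases hpre with h | h
        · omega
        · omega
      rintro ⟨-, -, -, -, hc, -⟩
      nlinarith [hxr.1]
    · omega
  · push Not at htriv
    have hy : 1 ≤ y := htriv.1
    have hn : 1 ≤ n := htriv.2
    rw [if_neg (by omega)]
    have hs0 : (0 : Int) < (y + 1) ^ 2 := by positivity
    by_cases hdvd : ((y + 1) ^ 2 : Int) ∣ n * y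
    · rw [if_neg (by simp [PySem.Int.mod_eq_zero_iff_dvd, hdvd])]
      set x0 := PySem.Int.floordiv (n * y) ((y + 1) ^ 2) with hx0def
      have hx0 : x0 * (y + 1) ^ 2 = n * y := by
        rw [hx0def, PySem.Int.floordiv_eq_ediv_of_pos hs0, Int.ediv_mul_cancel hdvd]
      by_cases hcond : 1 ≤ x0 ∧ x0 ≤ n ∧ PySem.Int.mod x0 y = 0 ∧ y < x0
      · rw [if_pos hcond]
        obtain ⟨hc1, hc2, hc3, hc4⟩ := hcond
        apply fourA_go_found
        · exact PySem.List.mem_pyRange_one.mpr ⟨hc1, by omega⟩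
        · exact (fourA_P_char n y x0 hy hc1).mpr
            ⟨hx0, (PySem.Int.mod_eq_zero_iff_dvd x0 y).mp hc3, hc4⟩
        · intro x hx hP
          have hxr := PySem.List.mem_pyRange_one.mp hx
          have := ((fourA_P_char n y x hy hxr.1).mp hP).1
          exact mul_right_cancel₀ (ne_of_gt hs0) (this.trans hx0.symm)
      · rw [if_neg hcond]
        apply fourA_go_none
        intro x hx hP
        have hxr := PySem.List.mem_pyRange_one.mp hx
        obtain ⟨heq, hd, hlt⟩ := (fourA_P_char n y x hy hxr.1).mp hP
        have hxx0 : x = x0 := mul_right_cancel₀ (ne_of_gt hs0) (heq.trans hx0.symm)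
        exact hcond ⟨by omega, by omega, (PySem.Int.mod_eq_zero_iff_dvd x0 y).mpr (hxx0 ▸ hd),
          by omega⟩
    · rw [if_pos (by simp [PySem.Int.mod_eq_zero_iff_dvd]; exact hdvd)]
      apply fourA_go_none
      intro x hx hP
      have hxr := PySem.List.mem_pyRange_one.mp hx
      obtain ⟨heq, -, -⟩ := (fourA_P_char n y x hy hxr.1).mp hP
      exact hdvd ⟨x, by linarith [heq]⟩
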